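-- pv_equiv track=rewrite | github.com/AnnaZamriy/Lab14 | Lab14.2.py | email
-- ===== SOURCE A (Python) =====
-- def email(emails):
--     email_count = {}
--     for email in emails:
--         domain = email.split('@')[1]
--         if domain in email_count:
--             email_count[domain] += 1
--         else:
--             email_count[domain] = 1
--     return email_count
-- ===== SOURCE B (Python) =====
-- def email(emails):
--     domains = [e.split('@')[1] for e in emails]
--     result = {}
--     while domains:
--         d = domains[0]
--         rest = [x for x in domains if x != d]
--         result[d] = len(domains) - len(rest)
--         domains = rest
--     return result
-- ===== Notes on version B (the rewrite author's own statement) =====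
-- stated objective: alternative
-- what changed: B replaces A's incremental hash-counting loop by a partition scheme: extract the domain list, then repeatedly split the remaining list on its first domain, recording each class size as a length difference, so no dict lookups or per-element counting are performed.
import Mathlib
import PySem

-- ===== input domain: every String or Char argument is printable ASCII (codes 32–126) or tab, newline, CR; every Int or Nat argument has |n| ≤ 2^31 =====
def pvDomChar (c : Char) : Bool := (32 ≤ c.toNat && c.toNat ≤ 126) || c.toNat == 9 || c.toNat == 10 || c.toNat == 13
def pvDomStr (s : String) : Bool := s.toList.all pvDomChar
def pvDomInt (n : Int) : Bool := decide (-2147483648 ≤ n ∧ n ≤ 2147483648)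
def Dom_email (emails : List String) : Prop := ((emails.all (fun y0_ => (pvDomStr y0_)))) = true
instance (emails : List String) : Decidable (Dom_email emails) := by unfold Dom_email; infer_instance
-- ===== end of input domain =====

-- B replaces A's hash-counting pass by a list-partition scheme (split off each first domain's
-- occurrences, count = length difference); objective: alternative.

-- shared primitive: e.split('@')[1]  (none = IndexError when e has no '@')
def pyDomain (e : String) : Option String :=
  PySem.List.pyGet? ((PySem.Str.split? e "@").getD []) 1

-- ===== PORT A =====
def emailGoA : List String → PySem.Dict String Int → Option (PySem.Dict String Int)
  | [], d => some d
  | e :: rest, d =>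
    match pyDomain e with
    | none => none
    | some dom =>
      emailGoA rest (if d.contains dom then d.insert dom (d.getD dom 0 + 1) else d.insert dom 1)

def email (emails : List String) : List (String × Int) :=
  match emailGoA emails PySem.Dict.empty with
  | some d => d.items
  | none => []

-- ===== PORT B =====
-- domains = [e.split('@')[1] for e in emails]
def emailDomsB : List String → Option (List String)
  | [] => some []
  | e :: rest =>
    match pyDomain e with
    | none => none
    | some dom => (emailDomsB rest).map (dom :: ·)

-- the while loop: split off the first domain's class, record its size as a length difference
def emailPart : List String → List (String × Int)
  | [] => []
  | d :: t =>
    (d, ((d :: t).length : Int) - ((d :: t).filter (fun x => x != d)).length)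
      :: emailPart ((d :: t).filter (fun x => x != d))
termination_by l => l.length
decreasing_by simp; exact List.length_filter_le _ _

def email_alt (emails : List String) : List (String × Int) :=
  match emailDomsB emails with
  | some ds => emailPart ds
  | none => []

-- ===== PRECONDITION & SPEC =====
-- Pre_: each address splits into at least two pieces at '@' (i.e. it contains an '@');
-- otherwise Python's e.split('@')[1] raises IndexError in both A and B.
def Pre_email (emails : List String) : Prop :=
  ∀ e ∈ emails, 2 ≤ ((PySem.Str.split? e "@").getD []).length
instance (emails : List String) : Decidable (Pre_email emails) := by unfold Pre_email; infer_instance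
def pvWitness_email : List String := ["a@x.com", "b@y.com", "c@x.com"]

def Spec_email (emails : List String) (out : List (String × Int)) : Prop := out = email_alt emails
instance (emails : List String) (out : List (String × Int)) : Decidable (Spec_email emails out) := by unfold Spec_email; infer_instance

-- ===== CLAIM (what is proved, stated in full; the proofs are below) =====
def Claim_equal_email : Prop := ∀ (emails : List String), Dom_email emails → Pre_email emails → Spec_email emails (email emails)

-- ===== LEMMAS AND PROOFS =====

theorem emailDomsB_isSome (emails : List String) (h : Pre_email emails) :
    ∃ ds, emailDomsB emails = some ds := by
  induction emails with
  | nil => exact ⟨[], rfl⟩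
  | cons e rest ih =>
    have he : 2 ≤ ((PySem.Str.split? e "@").getD []).length := h e (by simp)
    obtain ⟨ds, hds⟩ := ih (fun x hx => h x (by simp [hx]))
    have : ∃ d, pyDomain e = some d := by
      unfold pyDomain
      match hps : (PySem.Str.split? e "@").getD [], he with
      | a :: b :: t, _ => exact ⟨b, by simp [PySem.List.pyGet?, PySem.List.pyIdx?]⟩
    obtain ⟨d, hd⟩ := this
    exact ⟨d :: ds, by simp [emailDomsB, hd, hds]⟩

theorem emailGoA_of_doms (emails : List String) :
    ∀ ds d0, emailDomsB emails = some ds →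
    emailGoA emails d0 =
      some (ds.foldl (fun d x => d.insert x (d.getD x 0 + 1)) d0) := by
  induction emails with
  | nil =>
    intro ds d0 h
    simp only [emailDomsB, Option.some.injEq] at h
    subst h
    rfl
  | cons e rest ih =>
    intro ds d0 h
    simp only [emailDomsB] at h
    cases hd : pyDomain e with
    | none => simp [hd] at h
    | some dom =>
      simp only [hd] at h
      cases hrest : emailDomsB rest with
      | none => simp [hrest] at h
      | some ds' =>
        simp only [hrest, Option.map_some, Option.some.injEq] at h
        subst h
        simp only [emailGoA, hd, List.foldl_cons]
        rw [ih ds' _ hrest]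
        congr 1
        by_cases hc : d0.contains dom
        · simp [hc]
        · have h0 : d0.getD dom 0 = 0 := by
            simp only [PySem.Dict.getD]
            have : d0.get? dom = none := by
              rw [PySem.Dict.get?_eq_none_iff_not_mem_keys]
              intro hmem
              rw [PySem.Dict.contains_eq_decide_mem_keys] at hc
              simp [hmem] at hc
            simp [this]
          simp [hc, h0]

-- cons-style characterisation of first-occurrence dedup (proof helper)
def dedupF : List String → List String
  | [] => []
  | d :: t => d :: dedupF (t.filter (fun x => x != d))
termination_by l => l.length
decreasing_by simp; exact List.length_filter_le _ _

theorem mem_dedupF_aux (x : String) : ∀ (n : ℕ) (l : List String),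
    l.length ≤ n → x ∈ dedupF l → x ∈ l := by
  intro n
  induction n with
  | zero =>
    intro l hl h
    cases l with
    | nil => simp [dedupF] at h
    | cons d t => simp at hl
  | succ n ih =>
    intro l hl h
    cases l with
    | nil => simp [dedupF] at h
    | cons d t =>
      simp only [dedupF, List.mem_cons] at h
      rcases h with h | h
      · simp [h]
      · have hlen : (t.filter (fun x => x != d)).length ≤ n :=
          le_trans (List.length_filter_le _ _) (by simpa using hl)
        have := List.mem_of_mem_filter (ih _ hlen h)
        simp [this]

theorem mem_dedupF (x : String) (l : List String) (h : x ∈ dedupF l) : x ∈ l :=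
  mem_dedupF_aux x l.length l le_rfl h

theorem foldl_add_eq (xs : List String) : ∀ acc : List String,
    List.foldl PySem.Set.add acc xs = acc ++ dedupF (xs.filter (fun y => !acc.contains y)) := by
  induction xs with
  | nil => intro acc; simp [dedupF]
  | cons x t ih =>
    intro acc
    by_cases hc : acc.contains x = true
    · have hm : x ∈ acc := by simpa using hc
      have hadd : PySem.Set.add acc x = acc := by
        simp only [PySem.Set.add, PySem.Set.contains]
        simp [hm]
      simp only [List.foldl_cons, hadd, ih acc, List.filter_cons, hc, Bool.not_true]
      simp
    · have hm : x ∉ acc := by simpa using hc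
      have hadd : PySem.Set.add acc x = acc ++ [x] := by
        simp only [PySem.Set.add, PySem.Set.contains]
        simp [hm]
      have hb : (!acc.contains x) = true := by simpa using hm
      simp only [List.foldl_cons, hadd, ih (acc ++ [x])]
      have hfil : (x :: t).filter (fun y => !acc.contains y)
          = x :: t.filter (fun y => !acc.contains y) := by
        simp [hm]
      rw [hfil]
      simp only [dedupF]
      rw [List.filter_filter, List.append_assoc]
      have hfil2 : List.filter (fun y => !(acc ++ [x]).contains y) t
          = List.filter (fun a => a != x && !acc.contains a) t := by
        apply List.filter_congr
        intro y _
        by_cases hya : y ∈ acc <;> by_cases hyx : y = x <;>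
          simp [hya, hyx, bne]
      rw [hfil2]
      simp

theorem ofList_eq_dedupF (xs : List String) : PySem.Set.ofList xs = dedupF xs := by
  have := foldl_add_eq xs []
  simpa [PySem.Set.ofList, PySem.Set.empty, List.filter_true] using this

theorem countP_not_split (t : List String) (p : String → Bool) :
    t.countP p + t.countP (fun x => !(p x)) = t.length := by
  induction t with
  | nil => simp
  | cons a t ih => by_cases h : p a <;> simp [h] <;> omega

theorem emailPart_eq_aux : ∀ (n : ℕ) (ds : List String), ds.length ≤ n →
    emailPart ds = (dedupF ds).map (fun k => (k, (ds.count k : Int))) := by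
  intro n
  induction n with
  | zero =>
    intro ds hl
    cases ds with
    | nil => simp [emailPart, dedupF]
    | cons d t => simp at hl
  | succ n ih =>
    intro ds hl
    cases ds with
    | nil => simp [emailPart, dedupF]
    | cons d t =>
      simp only [emailPart, dedupF]
      have hfc : (d :: t).filter (fun x => x != d) = t.filter (fun x => x != d) := by
        simp
      rw [hfc]
      have hlen : (t.filter (fun x => x != d)).length ≤ n :=
        le_trans (List.length_filter_le _ _) (by simpa using hl)
      rw [ih _ hlen, List.map_cons]
      congr 1
      · -- head: the length difference is the count of d
        have hlen2 : (t.filter (fun x => x != d)).length + t.count d = t.length := by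
          have h1 : (t.filter (fun x => x != d)).length = t.countP (fun x => x != d) :=
            List.countP_eq_length_filter.symm
          have h2 : t.count d = t.countP (fun x => x == d) := rfl
          have h3 : t.countP (fun x => x == d) + t.countP (fun x => !(x == d)) = t.length :=
            countP_not_split t (fun x => x == d)
          have h4 : t.countP (fun x => x != d) = t.countP (fun x => !(x == d)) := by
            apply List.countP_congr; intro y _; simp [bne]
          omega
        simp only [List.count_cons_self, List.length_cons]
        congr 1
        push_cast
        omega
      · -- tail: counts over the filtered list agree with counts over d :: t
        apply List.map_congr_left
        intro k hk
        have hkf : k ∈ t.filter (fun x => x != d) := mem_dedupF k _ hk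
        have hkd : (k != d) = true := (List.mem_filter.mp hkf).2
        have hne : k ≠ d := by simpa using hkd
        rw [List.count_filter (p := fun x => x != d) hkd, List.count_cons_of_ne hne.symm]

theorem emailPart_eq (ds : List String) :
    emailPart ds = (dedupF ds).map (fun k => (k, (ds.count k : Int))) :=
  emailPart_eq_aux ds.length ds le_rfl

theorem email_spec : Claim_equal_email := by
  intro emails _ hpre
  unfold Spec_email email email_alt
  obtain ⟨ds, hds⟩ := emailDomsB_isSome emails hpre
  rw [emailGoA_of_doms emails ds PySem.Dict.empty hds, hds,
    PySem.Dict.foldl_insert_getD_add_one_eq_counter]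
  simp [PySem.Dict.items_counter, ofList_eq_dedupF ds, emailPart_eq ds]
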